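-- pv_equiv track=rewrite | github.com/SDSmirnov/AI-Microdrama-Factory | lib/studio/bookbinder.py | _find_split_paragraph
-- ===== SOURCE A (Python) =====
-- _ANCHOR_MATCH_LEN = 40  # chars used for paragraph matching
--
-- def _find_split_paragraph(paragraphs: list[str], anchor: str, search_from: int) -> int:
--     """
--     Find the paragraph index whose text best matches `anchor`.
--     Uses first _ANCHOR_MATCH_LEN chars; falls back to a shorter 20-char match.
--     Returns -1 if not found.
--     """
--     needle_long = anchor.strip()[:_ANCHOR_MATCH_LEN].lower()
--     needle_short = anchor.strip()[:20].lower()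
--     if not needle_short:
--         return -1
--     for i in range(search_from, len(paragraphs)):
--         if paragraphs[i].lower().startswith(needle_long):
--             return i
--     for i in range(search_from, len(paragraphs)):
--         if needle_short in paragraphs[i].lower():
--             return i
--     return -1
-- ===== SOURCE B (Python) =====
-- _ANCHOR_MATCH_LEN = 40  # chars used for paragraph matching
--
-- def _find_split_paragraph(paragraphs: list[str], anchor: str, search_from: int) -> int:
--     # Single pass: return eagerly on the first prefix match; only remember
--     # the first substring match and use it after the loop.
--     needle_long = anchor.strip()[:_ANCHOR_MATCH_LEN].lower()
--     needle_short = anchor.strip()[:20].lower()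
--     if not needle_short:
--         return -1
--     fallback = None
--     for i in range(search_from, len(paragraphs)):
--         text = paragraphs[i].lower()
--         if text.startswith(needle_long):
--             return i
--         if fallback is None and needle_short in text:
--             fallback = i
--     return fallback if fallback is not None else -1
-- ===== Notes on version B (the rewrite author's own statement) =====
-- stated objective: alternative
-- what changed: Replaces A's two sequential scans (prefix pass, then substring pass) by a single pass that lowercases each paragraph once, returns immediately on a prefix hit and remembers the first substring hit in a fallback variable.
import Mathlib
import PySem

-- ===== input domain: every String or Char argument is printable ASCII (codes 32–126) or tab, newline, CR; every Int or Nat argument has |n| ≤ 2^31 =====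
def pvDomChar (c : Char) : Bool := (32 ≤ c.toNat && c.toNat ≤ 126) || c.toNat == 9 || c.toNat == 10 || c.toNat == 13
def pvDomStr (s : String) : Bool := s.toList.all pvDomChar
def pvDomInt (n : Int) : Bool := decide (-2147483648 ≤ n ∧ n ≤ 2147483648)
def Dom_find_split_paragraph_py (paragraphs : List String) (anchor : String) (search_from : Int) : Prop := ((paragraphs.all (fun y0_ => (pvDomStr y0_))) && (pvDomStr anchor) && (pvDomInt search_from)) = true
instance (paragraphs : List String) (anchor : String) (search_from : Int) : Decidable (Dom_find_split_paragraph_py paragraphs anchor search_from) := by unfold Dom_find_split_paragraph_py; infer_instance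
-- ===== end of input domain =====

-- ===== PORT A =====
-- A: two passes over range(search_from, len), prefix match first, then substring match.
def fspA_lowerAt (paragraphs : List String) (i : Int) : List Char :=
  PySem.Chars.lower ((PySem.List.pyGet? paragraphs i).getD "").toList

def fspA_loop1 (paragraphs : List String) (needle_long : List Char) : List Int → Option Int
  | [] => none
  | i :: rest =>
      if PySem.Chars.startswith (fspA_lowerAt paragraphs i) needle_long then some i
      else fspA_loop1 paragraphs needle_long rest

def fspA_loop2 (paragraphs : List String) (needle_short : List Char) : List Int → Option Int
  | [] => none
  | i :: rest =>
      if PySem.Chars.isIn needle_short (fspA_lowerAt paragraphs i) then some i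
      else fspA_loop2 paragraphs needle_short rest

def find_split_paragraph_py (paragraphs : List String) (anchor : String) (search_from : Int) : Int :=
  let stripped := PySem.Chars.strip anchor.toList
  let needle_long := PySem.Chars.lower (PySem.List.slice stripped none (some (40 : Int)))
  let needle_short := PySem.Chars.lower (PySem.List.slice stripped none (some (20 : Int)))
  if needle_short = [] then -1
  else
    let idxs := PySem.List.pyRange search_from (paragraphs.length : Int) 1
    match fspA_loop1 paragraphs needle_long idxs with
    | some i => i
    | none =>
      match fspA_loop2 paragraphs needle_short idxs with
      | some i => i
      | none => -1

-- ===== PORT B =====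
-- B: one pass; return on first prefix hit, remember the first substring hit as fallback.
def fspB_loop (paragraphs : List String) (needle_long needle_short : List Char) (fallback : Option Int) : List Int → Int
  | [] => match fallback with | some j => j | none => -1
  | i :: rest =>
      let text := PySem.Chars.lower ((PySem.List.pyGet? paragraphs i).getD "").toList
      if PySem.Chars.startswith text needle_long then i
      else fspB_loop paragraphs needle_long needle_short
        (if fallback.isNone && PySem.Chars.isIn needle_short text then some i else fallback) rest

def find_split_paragraph_py_alt (paragraphs : List String) (anchor : String) (search_from : Int) : Int :=
  let stripped := PySem.Chars.strip anchor.toList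
  let needle_long := PySem.Chars.lower (PySem.List.slice stripped none (some (40 : Int)))
  let needle_short := PySem.Chars.lower (PySem.List.slice stripped none (some (20 : Int)))
  if needle_short = [] then -1
  else fspB_loop paragraphs needle_long needle_short none
    (PySem.List.pyRange search_from (paragraphs.length : Int) 1)

-- ===== PRECONDITION & SPEC =====
-- Pre_ excludes only inputs where the Python A raises IndexError: a nonempty needle with
-- search_from below -len(paragraphs) makes paragraphs[i] raise on the first iteration.
def Pre_find_split_paragraph_py (paragraphs : List String) (anchor : String) (search_from : Int) : Prop :=
  PySem.Chars.strip anchor.toList = [] ∨ -(paragraphs.length : Int) ≤ search_from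
instance (paragraphs : List String) (anchor : String) (search_from : Int) : Decidable (Pre_find_split_paragraph_py paragraphs anchor search_from) := by unfold Pre_find_split_paragraph_py; infer_instance

def pvWitness_find_split_paragraph_py : List String × String × Int := (["Hello world", "Second one"], "second ONE", 0)

def Spec_find_split_paragraph_py (paragraphs : List String) (anchor : String) (search_from : Int) (out : Int) : Prop := out = find_split_paragraph_py_alt paragraphs anchor search_from
instance (paragraphs : List String) (anchor : String) (search_from : Int) (out : Int) : Decidable (Spec_find_split_paragraph_py paragraphs anchor search_from out) := by unfold Spec_find_split_paragraph_py; infer_instance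

-- ===== CLAIM (what is proved, stated in full; the proofs are below) =====
def Claim_equal_find_split_paragraph_py : Prop := ∀ (paragraphs : List String) (anchor : String) (search_from : Int), Dom_find_split_paragraph_py paragraphs anchor search_from → Pre_find_split_paragraph_py paragraphs anchor search_from → Spec_find_split_paragraph_py paragraphs anchor search_from (find_split_paragraph_py paragraphs anchor search_from)

-- ===== LEMMAS AND PROOFS =====
-- One pass with a fallback accumulator equals A's prefix pass followed by its substring pass.
lemma fspB_loop_eq (ps : List String) (nl ns : List Char) (idxs : List Int) (fb : Option Int) :
    fspB_loop ps nl ns fb idxs =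
      match fspA_loop1 ps nl idxs with
      | some j => j
      | none =>
        match fb with
        | some a => a
        | none => match fspA_loop2 ps ns idxs with | some j => j | none => -1 := by
  induction idxs generalizing fb with
  | nil => cases fb <;> simp [fspB_loop, fspA_loop1, fspA_loop2]
  | cons i rest ih =>
      simp only [fspB_loop, fspA_loop1, fspA_loop2, fspA_lowerAt]
      by_cases hp : PySem.Chars.startswith (PySem.Chars.lower ((PySem.List.pyGet? ps i).getD "").toList) nl = true
      · simp [hp]
      · simp only [Bool.not_eq_true] at hp
        cases fb with
        | some a => simp [hp, ih]
        | none =>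
            by_cases hq : PySem.Chars.isIn ns (PySem.Chars.lower ((PySem.List.pyGet? ps i).getD "").toList) = true
            · simp [hp, hq, ih]
            · simp only [Bool.not_eq_true] at hq
              simp [hp, hq, ih]

-- ===== VERDICT (by name: the statement is the Claim_ definition above) =====
theorem find_split_paragraph_py_spec : Claim_equal_find_split_paragraph_py := by
  intro paragraphs anchor search_from _ _
  unfold Spec_find_split_paragraph_py find_split_paragraph_py find_split_paragraph_py_alt
  by_cases h : PySem.Chars.lower (PySem.List.slice (PySem.Chars.strip anchor.toList) none (some (20 : Int))) = []
  · simp [h]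
  · simp only [h, fspB_loop_eq]
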